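-- pv_equiv track=rewrite | github.com/LiangbinXie/mmsr | codes/data/util.py | index_generation
-- ===== SOURCE A (Python) =====
-- def index_generation(crt_i, max_n, N, padding='reflection'):
--     """Generate an index list for reading N frames from a sequence of images
--     Args:
--         crt_i (int): current center index
--         max_n (int): max number of the sequence of images (calculated from 1)
--         N (int): reading N frames
--         padding (str): padding mode, one of replicate | reflection | new_info | circle
--             Example: crt_i = 0, N = 5
--             replicate: [0, 0, 0, 1, 2]
--             reflection: [2, 1, 0, 1, 2]
--             new_info: [4, 3, 0, 1, 2]
--             circle: [3, 4, 0, 1, 2]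
--
--     Returns:
--         return_l (list [int]): a list of indexes
--     """
--     max_n = max_n - 1
--     n_pad = N // 2
--     return_l = []
--
--     for i in range(crt_i - n_pad, crt_i + n_pad + 1):
--         if i < 0:
--             if padding == 'replicate':
--                 add_idx = 0
--             elif padding == 'reflection':
--                 add_idx = -i
--             elif padding == 'new_info':
--                 add_idx = (crt_i + n_pad) + (-i)
--             elif padding == 'circle':
--                 add_idx = N + i
--             else:
--                 raise ValueError('Wrong padding mode')
--         elif i > max_n:
--             if padding == 'replicate':
--                 add_idx = max_n
--             elif padding == 'reflection':
--                 add_idx = max_n * 2 - i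
--             elif padding == 'new_info':
--                 add_idx = (crt_i - n_pad) - (i - max_n)
--             elif padding == 'circle':
--                 add_idx = i - N
--             else:
--                 raise ValueError('Wrong padding mode')
--         else:
--             add_idx = i
--         return_l.append(add_idx)
--     return return_l
-- ===== SOURCE B (Python) =====
-- def index_generation(crt_i, max_n, N, padding='reflection'):
--     m = max_n - 1
--     n_pad = N // 2
--     lo = crt_i - n_pad
--     hi = crt_i + n_pad
--     if lo > hi:
--         return []
--
--     def pad_left(i):
--         if padding == 'replicate':
--             return 0
--         elif padding == 'reflection':
--             return -i
--         elif padding == 'new_info':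
--             return hi - i
--         elif padding == 'circle':
--             return N + i
--         else:
--             raise ValueError('Wrong padding mode')
--
--     def pad_right(i):
--         if padding == 'replicate':
--             return m
--         elif padding == 'reflection':
--             return m * 2 - i
--         elif padding == 'new_info':
--             return lo - (i - m)
--         elif padding == 'circle':
--             return i - N
--         else:
--             raise ValueError('Wrong padding mode')
--
--     left_end = min(hi, -1)              # positions with raw index < 0
--     mid_lo = max(lo, 0)                 # in-range positions: 0 <= i <= m
--     mid_hi = min(hi, m)
--     right_lo = max(lo, 0, m + 1)        # positions with raw index >= 0 and > m
--     left = [pad_left(i) for i in range(lo, left_end + 1)]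
--     mid = list(range(mid_lo, mid_hi + 1))
--     right = [pad_right(i) for i in range(right_lo, hi + 1)]
--     return left + mid + right
-- ===== Notes on version B (the rewrite author's own statement) =====
-- stated objective: alternative
-- what changed: Replaces the per-index loop that tests every position against the bounds with a three-way block split: the left-pad, in-range and right-pad segments are computed as contiguous ranges, the middle block comes directly from range(), and the per-mode padding formula is evaluated only on the (possibly empty) pad segments, so ValueError still fires exactly when a pad position exists.
import Mathlib
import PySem

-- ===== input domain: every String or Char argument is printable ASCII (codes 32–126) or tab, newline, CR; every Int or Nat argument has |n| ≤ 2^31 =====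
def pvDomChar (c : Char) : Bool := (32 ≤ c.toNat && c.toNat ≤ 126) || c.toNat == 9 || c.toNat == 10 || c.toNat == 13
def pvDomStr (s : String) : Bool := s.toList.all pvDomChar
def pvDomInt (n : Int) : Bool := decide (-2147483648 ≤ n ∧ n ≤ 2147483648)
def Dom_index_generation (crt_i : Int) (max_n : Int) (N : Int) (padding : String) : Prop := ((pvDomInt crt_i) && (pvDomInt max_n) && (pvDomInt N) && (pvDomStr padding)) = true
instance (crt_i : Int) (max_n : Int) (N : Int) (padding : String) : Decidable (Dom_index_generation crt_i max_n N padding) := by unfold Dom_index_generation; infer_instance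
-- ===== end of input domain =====

-- B fills the window as three contiguous blocks (left pad / in-range / right pad) instead of
-- testing each index in one flat loop; same asymptotic cost (objective: alternative).

-- ===== PORT A =====
-- per-iteration body of A's loop: `none` is exactly where Python raises ValueError
def pvAddIdx (padding : String) (m n_pad crt_i N : Int) (i : Int) : Option Int :=
  if i < 0 then
    if padding == "replicate" then some 0
    else if padding == "reflection" then some (-i)
    else if padding == "new_info" then some ((crt_i + n_pad) + (-i))
    else if padding == "circle" then some (N + i)
    else none
  else if m < i then
    if padding == "replicate" then some m
    else if padding == "reflection" then some (m * 2 - i)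
    else if padding == "new_info" then some ((crt_i - n_pad) - (i - m))
    else if padding == "circle" then some (i - N)
    else none
  else some i

def index_generation (crt_i : Int) (max_n : Int) (N : Int) (padding : String) : List Int :=
  let m := max_n - 1
  let n_pad := PySem.Int.floordiv N 2
  (((PySem.List.pyRange (crt_i - n_pad) (crt_i + n_pad + 1) 1).foldl
      (fun acc i => acc.bind fun l => (pvAddIdx padding m n_pad crt_i N i).map fun v => l ++ [v])
      (some [])).getD [])

-- ===== PORT B =====
-- padding formula for a raw index < 0; `none` = ValueError
def pvPadLeft (padding : String) (hi N : Int) (i : Int) : Option Int :=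
  if padding == "replicate" then some 0
  else if padding == "reflection" then some (-i)
  else if padding == "new_info" then some (hi + (-i))
  else if padding == "circle" then some (N + i)
  else none

-- padding formula for a raw index > m (and ≥ 0); `none` = ValueError
def pvPadRight (padding : String) (m lo N : Int) (i : Int) : Option Int :=
  if padding == "replicate" then some m
  else if padding == "reflection" then some (m * 2 - i)
  else if padding == "new_info" then some (lo - (i - m))
  else if padding == "circle" then some (i - N)
  else none

def index_generation_alt (crt_i : Int) (max_n : Int) (N : Int) (padding : String) : List Int :=
  let m := max_n - 1
  let n_pad := PySem.Int.floordiv N 2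
  let lo := crt_i - n_pad
  let hi := crt_i + n_pad
  if lo > hi then []
  else
    let leftEnd := min hi (-1)
    let midLo := max lo 0
    let midHi := min hi m
    let rightLo := max (max lo 0) (m + 1)
    match (PySem.List.pyRange lo (leftEnd + 1) 1).mapM (pvPadLeft padding hi N),
          (PySem.List.pyRange rightLo (hi + 1) 1).mapM (pvPadRight padding m lo N) with
    | some l, some r => l ++ PySem.List.pyRange midLo (midHi + 1) 1 ++ r
    | _, _ => []

-- ===== PRECONDITION & SPEC =====
-- Pre_ excludes exactly the inputs on which A raises ValueError: an unknown padding mode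
-- together with a nonempty window reaching outside [0, max_n - 1].
def Pre_index_generation (crt_i : Int) (max_n : Int) (N : Int) (padding : String) : Prop :=
  padding = "replicate" ∨ padding = "reflection" ∨ padding = "new_info" ∨ padding = "circle"
  ∨ PySem.Int.floordiv N 2 < 0
  ∨ (0 ≤ crt_i - PySem.Int.floordiv N 2 ∧ crt_i + PySem.Int.floordiv N 2 ≤ max_n - 1)
instance (crt_i : Int) (max_n : Int) (N : Int) (padding : String) : Decidable (Pre_index_generation crt_i max_n N padding) := by unfold Pre_index_generation; infer_instance

def pvWitness_index_generation : Int × Int × Int × String := (2, 5, 3, "reflection")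

def Spec_index_generation (crt_i : Int) (max_n : Int) (N : Int) (padding : String) (out : List Int) : Prop := out = index_generation_alt crt_i max_n N padding
instance (crt_i : Int) (max_n : Int) (N : Int) (padding : String) (out : List Int) : Decidable (Spec_index_generation crt_i max_n N padding out) := by unfold Spec_index_generation; infer_instance

-- ===== CLAIM (what is proved, stated in full; the proofs are below) =====
def Claim_equal_index_generation : Prop := ∀ (crt_i : Int) (max_n : Int) (N : Int) (padding : String), Dom_index_generation crt_i max_n N padding → Pre_index_generation crt_i max_n N padding → Spec_index_generation crt_i max_n N padding (index_generation crt_i max_n N padding)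

-- ===== LEMMAS AND PROOFS =====

-- two ranges with step 1 are equal when their bounds agree or both are empty
theorem pv_pyRange_congr (a b c d : Int) (h : (a = c ∧ b = d) ∨ (b ≤ a ∧ d ≤ c)) :
    PySem.List.pyRange a b 1 = PySem.List.pyRange c d 1 := by
  rcases h with ⟨h1, h2⟩ | ⟨h1, h2⟩
  · rw [h1, h2]
  · rw [PySem.List.pyRange_one_eq_nil h1, PySem.List.pyRange_one_eq_nil h2]

-- the full window splits into B's three blocks: negatives, in-range, beyond m
theorem pv_range_split (lo hi m : Int) (h : lo ≤ hi + 1) :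
    PySem.List.pyRange lo (hi + 1) 1 =
      PySem.List.pyRange lo (min hi (-1) + 1) 1
      ++ PySem.List.pyRange (max lo 0) (min hi m + 1) 1
      ++ PySem.List.pyRange (max (max lo 0) (m + 1)) (hi + 1) 1 := by
  rw [PySem.List.pyRange_one_append lo (min (hi + 1) (max lo 0)) (hi + 1) (by omega) (by omega),
      PySem.List.pyRange_one_append (min (hi + 1) (max lo 0))
        (max (min (hi + 1) (max lo 0)) (min (hi + 1) (m + 1))) (hi + 1) (le_max_left _ _)
        (by omega),
      List.append_assoc]
  congr 1
  · exact pv_pyRange_congr _ _ _ _ (by omega)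
  congr 1
  · exact pv_pyRange_congr _ _ _ _ (by omega)
  · exact pv_pyRange_congr _ _ _ _ (by omega)

-- A's append-fold over an Option accumulator, when every step succeeds, is a map
theorem pv_foldl_opt (h : Int → Option Int) (g : Int → Int) (l : List Int) :
    ∀ (init : List Int), (∀ x ∈ l, h x = some (g x)) →
    l.foldl (fun acc i => acc.bind fun xs => (h i).map fun v => xs ++ [v]) (some init)
      = some (init ++ l.map g) := by
  induction l with
  | nil => intro init _; simp
  | cons a t ih =>
    intro init hs
    have hstep : ((some init).bind fun xs => (h a).map fun v => xs ++ [v])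
        = some (init ++ [g a]) := by rw [hs a (List.mem_cons_self)]; rfl
    rw [List.foldl_cons, hstep, ih _ (fun x hx => hs x (List.mem_cons_of_mem _ hx))]
    simp

-- mapM over Option, when every element succeeds, is a map
theorem pv_mapM_some (h : Int → Option Int) (g : Int → Int) (l : List Int)
    (hs : ∀ x ∈ l, h x = some (g x)) : l.mapM h = some (l.map g) := by
  induction l with
  | nil => rfl
  | cons a t ih =>
    rw [List.mapM_cons, hs a (List.mem_cons_self), ih (fun x hx => hs x (List.mem_cons_of_mem _ hx))]
    rfl

-- A's per-index body is B's left/right formula on the corresponding region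
theorem pv_addIdx_split (padding : String) (m np c N i : Int) :
    pvAddIdx padding m np c N i =
      if i < 0 then pvPadLeft padding (c + np) N i
      else if m < i then pvPadRight padding m (c - np) N i
      else some i := rfl

theorem pv_padLeft_some (padding : String)
    (hv : padding = "replicate" ∨ padding = "reflection" ∨ padding = "new_info" ∨ padding = "circle")
    (hi N i : Int) :
    pvPadLeft padding hi N i = some ((pvPadLeft padding hi N i).getD 0) := by
  rcases hv with h | h | h | h <;> subst h <;> rfl

theorem pv_padRight_some (padding : String)
    (hv : padding = "replicate" ∨ padding = "reflection" ∨ padding = "new_info" ∨ padding = "circle")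
    (m lo N i : Int) :
    pvPadRight padding m lo N i = some ((pvPadRight padding m lo N i).getD 0) := by
  rcases hv with h | h | h | h <;> subst h <;> rfl

-- ===== VERDICT (by name: the statement is the Claim_ definition above) =====
theorem index_generation_spec : Claim_equal_index_generation := by
  intro c mx N padding _ hpre
  unfold Spec_index_generation index_generation index_generation_alt
  simp only []
  set m := mx - 1 with hm
  set np := PySem.Int.floordiv N 2 with hnp
  by_cases hwin : c - np > c + np
  · rw [if_pos hwin, PySem.List.pyRange_one_eq_nil (by omega)]
    rfl
  · rw [if_neg hwin]
    by_cases hv : padding = "replicate" ∨ padding = "reflection" ∨ padding = "new_info" ∨ padding = "circle"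
    · -- valid padding: everything succeeds; reduce both sides to maps of total functions
      have hL : ∀ i, pvPadLeft padding (c + np) N i
          = some ((pvPadLeft padding (c + np) N i).getD 0) := pv_padLeft_some padding hv _ N
      have hR : ∀ i, pvPadRight padding m (c - np) N i
          = some ((pvPadRight padding m (c - np) N i).getD 0) := pv_padRight_some padding hv _ _ N
      have hA : ∀ x ∈ PySem.List.pyRange (c - np) (c + np + 1) 1,
          pvAddIdx padding m np c N x = some (if x < 0 then (pvPadLeft padding (c + np) N x).getD 0
            else if m < x then (pvPadRight padding m (c - np) N x).getD 0 else x) := by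
        intro x _
        rw [pv_addIdx_split]
        split_ifs with h1 h2
        · exact hL x
        · exact hR x
        · rfl
      rw [pv_foldl_opt _ _ _ [] hA,
          pv_mapM_some _ _ _ (fun x _ => hL x),
          pv_mapM_some _ _ _ (fun x _ => hR x)]
      simp only [Option.getD_some, List.nil_append]
      rw [pv_range_split (c - np) (c + np) m (by omega), List.map_append, List.map_append]
      congr 1
      · congr 1
        · refine List.map_congr_left (fun x hx => ?_)
          rw [PySem.List.mem_pyRange_one] at hx
          rw [if_pos (by omega)]
        · conv_rhs => rw [← List.map_id (PySem.List.pyRange (max (c - np) 0) (min (c + np) m + 1) 1)]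
          refine List.map_congr_left (fun x hx => ?_)
          rw [PySem.List.mem_pyRange_one] at hx
          rw [if_neg (by omega), if_neg (by omega)]
          rfl
      · refine List.map_congr_left (fun x hx => ?_)
        rw [PySem.List.mem_pyRange_one] at hx
        rw [if_neg (by omega), if_pos (by omega)]
    · -- unknown padding: Pre_ forces the whole window in range, so no formula is consulted
      have hin : 0 ≤ c - np ∧ c + np ≤ m := by
        rcases hpre with h | h | h | h | h | h
        · exact absurd (Or.inl h) hv
        · exact absurd (Or.inr (Or.inl h)) hv
        · exact absurd (Or.inr (Or.inr (Or.inl h))) hv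
        · exact absurd (Or.inr (Or.inr (Or.inr h))) hv
        · omega
        · exact h
      have hA : ∀ x ∈ PySem.List.pyRange (c - np) (c + np + 1) 1,
          pvAddIdx padding m np c N x = some (id x) := by
        intro x hx
        rw [PySem.List.mem_pyRange_one] at hx
        rw [pv_addIdx_split, if_neg (by omega), if_neg (by omega)]
        rfl
      rw [pv_foldl_opt _ _ _ [] hA,
          PySem.List.pyRange_one_eq_nil (a := c - np) (b := min (c + np) (-1) + 1) (by omega),
          PySem.List.pyRange_one_eq_nil (a := max (max (c - np) 0) (m + 1)) (b := c + np + 1) (by omega)]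
      simp only [List.mapM_nil, Option.getD_some, List.nil_append, List.map_id, List.append_nil]
      exact (pv_pyRange_congr _ _ _ _ (by omega)).symm
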